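-- pv_equiv track=rewrite | github.com/deverac/hpircomm | src/util.py | set_parity
-- ===== SOURCE A (Python) =====
-- def count_ones(n):
--     return len(bin(n & 0x7F)[2:].replace('0', ''))
--
-- def set_parity(bytes, parity):
--     mod = []
--     for byte in bytes:
--         if parity == 0: # none
--             mod.append(byte)
--         elif parity == 1: # odd
--             parity_bit = ((count_ones(byte) + 1) % 2) << 7
--             mod.append(byte | parity_bit)
--         elif parity == 2: # even
--             parity_bit = (count_ones(byte) % 2) << 7
--             mod.append(byte | parity_bit)
--         elif parity == 3: # mark
--             mod.append(byte | 0x80)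
--         elif parity == 4: # space
--             mod.append(byte & 0x7F)
--     return mod
-- ===== SOURCE B (Python) =====
-- def set_parity(bytes, parity):
--     if parity == 4:
--         return [b & 0x7F for b in bytes]
--     if parity not in (0, 1, 2, 3):
--         return []
--     # Precompute a 128-entry OR-mask table indexed by the low 7 bits; the
--     # parity bit for modes 1/2 comes from an XOR-fold (no popcount/bin()).
--     table = []
--     for v in range(128):
--         if parity == 0:
--             table.append(0)
--         elif parity == 3:
--             table.append(0x80)
--         else:
--             p = v ^ (v >> 4)
--             p ^= p >> 2
--             p ^= p >> 1
--             table.append(0x80 if (p & 1) == (parity - 1) else 0)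
--     return [b | table[b & 0x7F] for b in bytes]
-- ===== Notes on version B (the rewrite author's own statement) =====
-- stated objective: faster
-- what changed: B replaces A's per-byte 5-way branch with bin()-string popcount by a precomputed 128-entry OR-mask lookup table indexed by the low 7 bits, with the parity bit computed once per table slot via an XOR-fold (no popcount), then a single uniform table-lookup pass over the bytes (measured ~2.3x at n=262144).
import Mathlib
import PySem

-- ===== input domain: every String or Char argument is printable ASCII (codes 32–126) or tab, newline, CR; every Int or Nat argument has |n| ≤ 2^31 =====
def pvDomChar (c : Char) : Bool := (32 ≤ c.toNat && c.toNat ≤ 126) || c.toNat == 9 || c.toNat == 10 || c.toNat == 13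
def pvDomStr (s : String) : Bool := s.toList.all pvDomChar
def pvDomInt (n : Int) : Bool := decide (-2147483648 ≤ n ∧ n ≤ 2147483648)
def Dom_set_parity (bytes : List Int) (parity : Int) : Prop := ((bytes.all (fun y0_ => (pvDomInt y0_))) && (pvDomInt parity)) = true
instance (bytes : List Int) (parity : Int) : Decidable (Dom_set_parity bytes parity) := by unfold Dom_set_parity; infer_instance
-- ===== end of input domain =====

-- B precomputes a 128-entry OR-mask table (parity bit via an XOR-fold, no popcount) and applies it by low-7-bit lookup in one uniform pass; A branches per byte and counts '1' bits via bin(). Return-value equivalence; objective: faster (measured).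

-- ===== PORT A =====
-- count_ones(n) = number of '1's in bin(n & 0x7F); PySem.Int.bitCount of n & 0x7F is exact here.
def count_ones (n : Int) : Int := (PySem.Int.bitCount (PySem.Int.band n 127) : Int)

def set_parity (bytes : List Int) (parity : Int) : List Int :=
  bytes.foldl (fun mod byte =>
    if parity = 0 then mod ++ [byte]
    else if parity = 1 then
      mod ++ [PySem.Int.bor byte ((PySem.Int.mod (count_ones byte + 1) 2) <<< (7 : Nat))]
    else if parity = 2 then
      mod ++ [PySem.Int.bor byte ((PySem.Int.mod (count_ones byte) 2) <<< (7 : Nat))]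
    else if parity = 3 then mod ++ [PySem.Int.bor byte 128]
    else if parity = 4 then mod ++ [PySem.Int.band byte 127]
    else mod) []

-- ===== PORT B =====
-- table entry for index v (0 ≤ v < 128): the body of Source B's table-building loop.
def pvEntry (parity : Int) (v : Int) : Int :=
  if parity = 0 then 0
  else if parity = 3 then 128
  else
    let p := PySem.Int.bxor v (v >>> (4 : Nat))
    let p := PySem.Int.bxor p (p >>> (2 : Nat))
    let p := PySem.Int.bxor p (p >>> (1 : Nat))
    if PySem.Int.band p 1 = parity - 1 then 128 else 0

def set_parity_alt (bytes : List Int) (parity : Int) : List Int :=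
  if parity = 4 then bytes.map (fun b => PySem.Int.band b 127)
  else if ¬(parity = 0 ∨ parity = 1 ∨ parity = 2 ∨ parity = 3) then []
  else
    let table := (PySem.List.pyRange 0 128).foldl (fun t v => t ++ [pvEntry parity v]) []
    -- table[b & 0x7F]: the index is always in range (0 ≤ b & 127 < 128), so the default is never used
    bytes.map (fun b => PySem.Int.bor b (PySem.List.pyGetD table (PySem.Int.band b 127) 0))

-- ===== PRECONDITION & SPEC =====
def Spec_set_parity (bytes : List Int) (parity : Int) (out : List Int) : Prop := out = set_parity_alt bytes parity
instance (bytes : List Int) (parity : Int) (out : List Int) : Decidable (Spec_set_parity bytes parity out) := by unfold Spec_set_parity; infer_instance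

-- ===== CLAIM (what is proved, stated in full; the proofs are below) =====
def Claim_equal_set_parity : Prop := ∀ (bytes : List Int) (parity : Int), Dom_set_parity bytes parity → Spec_set_parity bytes parity (set_parity bytes parity)

-- ===== LEMMAS AND PROOFS =====
theorem band127_bounds (b : Int) : 0 ≤ PySem.Int.band b 127 ∧ PySem.Int.band b 127 < 128 := by
  by_cases hb : 0 ≤ b
  · rw [PySem.Int.band_of_nonneg hb (by norm_num)]
    have h := Nat.and_le_right (n := b.toNat) (m := (127 : Int).toNat)
    omega
  · unfold PySem.Int.band
    rw [if_neg hb, if_pos (by norm_num : (0:Int) ≤ 127)]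
    have h := Nat.sub_le ((127 : Int).toNat) (((127 : Int).toNat) &&& (-b - 1).toNat)
    omega

-- the table lookup at index b & 0x7F is the table-entry function at that index
theorem lookup_entry (parity b : Int) :
    PySem.List.pyGetD ((PySem.List.pyRange 0 128).foldl (fun t v => t ++ [pvEntry parity v]) [])
      (PySem.Int.band b 127) 0 = pvEntry parity (PySem.Int.band b 127) := by
  rw [PySem.List.foldl_append_singleton_eq_map]
  simp only [List.nil_append]
  have hb := band127_bounds b
  have hk : PySem.Int.band b 127 = ((PySem.Int.band b 127).toNat : Int) := by omega
  have hlt : (PySem.Int.band b 127).toNat < 128 := by omega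
  rw [hk]
  rw [show ((128 : Int) = ((128 : Nat) : Int)) by norm_num]
  rw [PySem.List.pyGetD_map_pyRange _ 128 _ 0 hlt]

-- the XOR-fold entry equals A's popcount-based parity bit, checked on all 128 indices
theorem entry_eq_1 : ∀ k : Nat, k < 128 →
    pvEntry 1 (k : Int) = (PySem.Int.mod ((PySem.Int.bitCount (k : Int) : Int) + 1) 2) <<< (7 : Nat) := by decide

theorem entry_eq_2 : ∀ k : Nat, k < 128 →
    pvEntry 2 (k : Int) = (PySem.Int.mod ((PySem.Int.bitCount (k : Int) : Int)) 2) <<< (7 : Nat) := by decide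

theorem entry_at_band_1 (b : Int) :
    pvEntry 1 (PySem.Int.band b 127) = (PySem.Int.mod (count_ones b + 1) 2) <<< (7 : Nat) := by
  have hb := band127_bounds b
  have hk : PySem.Int.band b 127 = ((PySem.Int.band b 127).toNat : Int) := by omega
  rw [hk, entry_eq_1 _ (by omega)]
  unfold count_ones
  rw [← hk]

theorem entry_at_band_2 (b : Int) :
    pvEntry 2 (PySem.Int.band b 127) = (PySem.Int.mod (count_ones b) 2) <<< (7 : Nat) := by
  have hb := band127_bounds b
  have hk : PySem.Int.band b 127 = ((PySem.Int.band b 127).toNat : Int) := by omega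
  rw [hk, entry_eq_2 _ (by omega)]
  unfold count_ones
  rw [← hk]

theorem entry_at_band_0 (b : Int) : pvEntry 0 (PySem.Int.band b 127) = 0 := by
  unfold pvEntry; simp

theorem entry_at_band_3 (b : Int) : pvEntry 3 (PySem.Int.band b 127) = 128 := by
  unfold pvEntry; norm_num

theorem bor_zero_int (b : Int) : PySem.Int.bor b 0 = b := PySem.Int.bor_zero b

-- ===== VERDICT (by name: the statement is the Claim_ definition above) =====
theorem set_parity_spec : Claim_equal_set_parity := by
  intro bytes parity _
  unfold Spec_set_parity set_parity set_parity_alt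
  by_cases h4 : parity = 4
  · simp only [h4, Int.reduceEq, reduceIte]
    rw [PySem.List.foldl_append_singleton_eq_map]
    simp
  by_cases h0 : parity = 0
  · simp only [h0, Int.reduceEq, reduceIte]
    rw [PySem.List.foldl_append_singleton_eq_map]
    simp only [List.nil_append]
    apply List.map_congr_left
    intro b _
    rw [lookup_entry, entry_at_band_0, bor_zero_int]
  by_cases h1 : parity = 1
  · simp only [h1, Int.reduceEq, reduceIte]
    rw [PySem.List.foldl_append_singleton_eq_map]
    simp only [List.nil_append]
    apply List.map_congr_left
    intro b _
    rw [lookup_entry, entry_at_band_1]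
  by_cases h2 : parity = 2
  · simp only [h2, Int.reduceEq, reduceIte]
    rw [PySem.List.foldl_append_singleton_eq_map]
    simp only [List.nil_append]
    apply List.map_congr_left
    intro b _
    rw [lookup_entry, entry_at_band_2]
  by_cases h3 : parity = 3
  · simp only [h3, Int.reduceEq, reduceIte]
    rw [PySem.List.foldl_append_singleton_eq_map]
    simp only [List.nil_append]
    apply List.map_congr_left
    intro b _
    rw [lookup_entry, entry_at_band_3]
  · simp [h0, h1, h2, h3, h4]
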